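-- pv_equiv track=rewrite | github.com/blockhead22/GroundCheck | groundcheck/ml_detector.py | _is_semantic_equivalent
-- ===== SOURCE A (Python) =====
-- from typing import Dict, Any, Optional, Set
--
-- def _is_meaningful_substring(substring: str, full_text: str) -> bool:
--     if len(substring) > 5:
--         return True
--     return full_text.startswith(substring) or full_text.endswith(substring)
--
-- SEMANTIC_EQUIVALENTS: Dict[str, Set[str]] = {
--     "phd": {"doctorate", "doctoral", "ph.d.", "doctor of philosophy", "doctoral degree"},
--     "doctorate": {"phd", "doctoral", "ph.d.", "doctor of philosophy"},
--     "masters": {"master's", "ms", "ma", "msc", "master of science", "master of arts"},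
--     "bachelor": {"bachelor's", "bs", "ba", "bsc", "undergraduate"},
--     "ml": {"machine learning", "ai", "artificial intelligence", "deep learning"},
--     "ai": {"artificial intelligence", "ml", "machine learning", "deep learning"},
--     "cs": {"computer science", "computing", "comp sci"},
--     "data science": {"data analytics", "analytics", "data engineering"},
--     "developer": {"engineer", "programmer", "coder", "software engineer"},
--     "engineer": {"developer", "programmer", "software developer"},
--     "scientist": {"researcher", "analyst"},
--     "married": {"spouse", "husband", "wife", "partner"},
--     "dog": {"pup", "puppy", "pet", "canine"},
--     "cat": {"kitty", "kitten", "pet", "feline"},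
-- }
--
-- def _is_semantic_equivalent(old_value: str, new_value: str) -> bool:
--     """Check if two values are semantically equivalent (not a contradiction)."""
--     old_lower = str(old_value).lower().strip()
--     new_lower = str(new_value).lower().strip()
--
--     if old_lower == new_lower:
--         return True
--
--     # Substring / detail enrichment
--     if old_lower in new_lower and _is_meaningful_substring(old_lower, new_lower):
--         return True
--     if new_lower in old_lower and _is_meaningful_substring(new_lower, old_lower):
--         return True
--
--     # Synonym database
--     old_words = set(old_lower.split())
--     new_words = set(new_lower.split())
--
--     for key, synonyms in SEMANTIC_EQUIVALENTS.items():
--         all_forms = {key} | synonyms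
--         old_has = bool(old_words & all_forms)
--         new_has = bool(new_words & all_forms)
--         if not (old_has and new_has):
--             for form in all_forms:
--                 if " " in form:
--                     if form in old_lower:
--                         old_has = True
--                     if form in new_lower:
--                         new_has = True
--         if old_has and new_has:
--             return True
--
--     return False
-- ===== SOURCE B (Python) =====
-- # B: precomputed flat inverted index (form -> group id), per-side group-id sets, intersection test.
-- from typing import Dict, Set
--
-- def _is_meaningful_substring(substring: str, full_text: str) -> bool:
--     if len(substring) > 5:
--         return True
--     return full_text.startswith(substring) or full_text.endswith(substring)
--
-- SEMANTIC_EQUIVALENTS: Dict[str, Set[str]] = {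
--     "phd": {"doctorate", "doctoral", "ph.d.", "doctor of philosophy", "doctoral degree"},
--     "doctorate": {"phd", "doctoral", "ph.d.", "doctor of philosophy"},
--     "masters": {"master's", "ms", "ma", "msc", "master of science", "master of arts"},
--     "bachelor": {"bachelor's", "bs", "ba", "bsc", "undergraduate"},
--     "ml": {"machine learning", "ai", "artificial intelligence", "deep learning"},
--     "ai": {"artificial intelligence", "ml", "machine learning", "deep learning"},
--     "cs": {"computer science", "computing", "comp sci"},
--     "data science": {"data analytics", "analytics", "data engineering"},
--     "developer": {"engineer", "programmer", "coder", "software engineer"},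
--     "engineer": {"developer", "programmer", "software developer"},
--     "scientist": {"researcher", "analyst"},
--     "married": {"spouse", "husband", "wife", "partner"},
--     "dog": {"pup", "puppy", "pet", "canine"},
--     "cat": {"kitty", "kitten", "pet", "feline"},
-- }
--
-- # Flat inverted index, built once: single-word forms match whole words,
-- # multi-word forms match as substrings of the full lowered text.
-- _SINGLE = [(form, gid)
--            for gid, (key, syns) in enumerate(SEMANTIC_EQUIVALENTS.items())
--            for form in ({key} | syns) if " " not in form]
-- _MULTI = [(form, gid)
--           for gid, (key, syns) in enumerate(SEMANTIC_EQUIVALENTS.items())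
--           for form in ({key} | syns) if " " in form]
--
-- def _group_ids(text_lower: str) -> Set[int]:
--     words = set(text_lower.split())
--     ids = {gid for form, gid in _SINGLE if form in words}
--     ids.update(gid for form, gid in _MULTI if form in text_lower)
--     return ids
--
-- def _is_semantic_equivalent(old_value: str, new_value: str) -> bool:
--     old_lower = str(old_value).lower().strip()
--     new_lower = str(new_value).lower().strip()
--
--     if old_lower == new_lower:
--         return True
--     if old_lower in new_lower and _is_meaningful_substring(old_lower, new_lower):
--         return True
--     if new_lower in old_lower and _is_meaningful_substring(new_lower, old_lower):
--         return True
--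
--     return not _group_ids(old_lower).isdisjoint(_group_ids(new_lower))
-- ===== Notes on version B (the rewrite author's own statement) =====
-- stated objective: alternative
-- what changed: Replaces the per-group loop with mutable old_has/new_has flags, early return and runtime single/multi-word splitting by a module-level flat inverted index (form, group-id) precomputed once with the single/multi split done up front; each side's matching group-id set is computed independently and the function returns whether the two sets intersect.
import Mathlib
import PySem

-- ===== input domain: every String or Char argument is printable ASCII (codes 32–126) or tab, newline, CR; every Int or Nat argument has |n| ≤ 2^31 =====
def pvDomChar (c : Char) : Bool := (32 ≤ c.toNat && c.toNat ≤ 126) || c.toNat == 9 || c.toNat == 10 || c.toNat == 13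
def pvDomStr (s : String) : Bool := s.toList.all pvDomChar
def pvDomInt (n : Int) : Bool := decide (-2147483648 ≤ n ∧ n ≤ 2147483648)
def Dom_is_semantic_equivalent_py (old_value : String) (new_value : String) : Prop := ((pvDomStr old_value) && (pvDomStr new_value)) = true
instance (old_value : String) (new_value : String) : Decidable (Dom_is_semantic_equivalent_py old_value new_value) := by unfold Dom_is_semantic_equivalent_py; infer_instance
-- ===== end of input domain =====

-- B replaces A's per-group flag loop by a precomputed flat inverted index (form, group-id),
-- computes each side's matching group-id set independently and intersects (objective: alternative).

-- ===== PORT A =====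
-- the SEMANTIC_EQUIVALENTS table (dict of sets → assoc list of lists; both ports read it)
def pvSem : List (String × List String) :=
  [("phd", ["doctorate", "doctoral", "ph.d.", "doctor of philosophy", "doctoral degree"]),
   ("doctorate", ["phd", "doctoral", "ph.d.", "doctor of philosophy"]),
   ("masters", ["master's", "ms", "ma", "msc", "master of science", "master of arts"]),
   ("bachelor", ["bachelor's", "bs", "ba", "bsc", "undergraduate"]),
   ("ml", ["machine learning", "ai", "artificial intelligence", "deep learning"]),
   ("ai", ["artificial intelligence", "ml", "machine learning", "deep learning"]),
   ("cs", ["computer science", "computing", "comp sci"]),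
   ("data science", ["data analytics", "analytics", "data engineering"]),
   ("developer", ["engineer", "programmer", "coder", "software engineer"]),
   ("engineer", ["developer", "programmer", "software developer"]),
   ("scientist", ["researcher", "analyst"]),
   ("married", ["spouse", "husband", "wife", "partner"]),
   ("dog", ["pup", "puppy", "pet", "canine"]),
   ("cat", ["kitty", "kitten", "pet", "feline"])]

-- _is_meaningful_substring (helper of both Pythons, verbatim)
def pvMeaningful (substring : String) (full_text : String) : Bool :=
  if 5 < PySem.Str.len substring then true
  else PySem.Str.startswith full_text substring || PySem.Str.endswith full_text substring

-- A's 'for key, synonyms in SEMANTIC_EQUIVALENTS.items():' loop with early return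
def pvLoopA : List (String × List String) → PySem.Set String → PySem.Set String → String → String → Bool
  | [], _, _, _, _ => false
  | g :: rest, ow, nw, ol, nl =>
    let allForms : PySem.Set String := PySem.Set.ofList (g.1 :: g.2)
    let oldHas : Bool := !(PySem.Set.inter ow allForms).isEmpty
    let newHas : Bool := !(PySem.Set.inter nw allForms).isEmpty
    let p : Bool × Bool :=
      if !(oldHas && newHas) then
        allForms.foldl (fun p f =>
          if PySem.Str.isIn " " f then
            (p.1 || PySem.Str.isIn f ol, p.2 || PySem.Str.isIn f nl)
          else p) (oldHas, newHas)
      else (oldHas, newHas)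
    if p.1 && p.2 then true else pvLoopA rest ow nw ol nl

def is_semantic_equivalent_py (old_value : String) (new_value : String) : Bool :=
  let old_lower := PySem.Str.strip (PySem.Str.lower old_value)
  let new_lower := PySem.Str.strip (PySem.Str.lower new_value)
  if old_lower == new_lower then true
  else if PySem.Str.isIn old_lower new_lower && pvMeaningful old_lower new_lower then true
  else if PySem.Str.isIn new_lower old_lower && pvMeaningful new_lower old_lower then true
  else
    pvLoopA pvSem (PySem.Set.ofList (PySem.Str.split₀ old_lower))
      (PySem.Set.ofList (PySem.Str.split₀ new_lower)) old_lower new_lower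

-- ===== PORT B =====
-- _SINGLE: flat (form, gid) pairs for forms without a space
def pvSingle : List (String × Int) :=
  (PySem.List.enumerate pvSem).flatMap (fun q =>
    (((PySem.Set.ofList (q.2.1 :: q.2.2)) : List String).filter
        (fun f => !PySem.Str.isIn " " f)).map (fun f => (f, q.1)))

-- _MULTI: flat (form, gid) pairs for forms containing a space
def pvMulti : List (String × Int) :=
  (PySem.List.enumerate pvSem).flatMap (fun q =>
    (((PySem.Set.ofList (q.2.1 :: q.2.2)) : List String).filter
        (fun f => PySem.Str.isIn " " f)).map (fun f => (f, q.1)))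

-- _group_ids
def pvGroupIds (text_lower : String) : PySem.Set Int :=
  let words : PySem.Set String := PySem.Set.ofList (PySem.Str.split₀ text_lower)
  let ids : PySem.Set Int :=
    PySem.Set.ofList ((pvSingle.filter (fun p => PySem.Set.contains words p.1)).map (fun p => p.2))
  PySem.Set.update ids ((pvMulti.filter (fun p => PySem.Str.isIn p.1 text_lower)).map (fun p => p.2))

def is_semantic_equivalent_py_alt (old_value : String) (new_value : String) : Bool :=
  let old_lower := PySem.Str.strip (PySem.Str.lower old_value)
  let new_lower := PySem.Str.strip (PySem.Str.lower new_value)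
  if old_lower == new_lower then true
  else if PySem.Str.isIn old_lower new_lower && pvMeaningful old_lower new_lower then true
  else if PySem.Str.isIn new_lower old_lower && pvMeaningful new_lower old_lower then true
  else
    !(PySem.Set.isdisjoint (pvGroupIds old_lower) (pvGroupIds new_lower))

-- ===== PRECONDITION & SPEC =====
def Spec_is_semantic_equivalent_py (old_value : String) (new_value : String) (out : Bool) : Prop := out = is_semantic_equivalent_py_alt old_value new_value
instance (old_value : String) (new_value : String) (out : Bool) : Decidable (Spec_is_semantic_equivalent_py old_value new_value out) := by unfold Spec_is_semantic_equivalent_py; infer_instance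

-- ===== CLAIM (what is proved, stated in full; the proofs are below) =====
def Claim_equal_is_semantic_equivalent_py : Prop := ∀ (old_value : String) (new_value : String), Dom_is_semantic_equivalent_py old_value new_value → Spec_is_semantic_equivalent_py old_value new_value (is_semantic_equivalent_py old_value new_value)

-- ===== LEMMAS AND PROOFS =====

-- "this group matches this text": some form is one of the text's words,
-- or some space-containing form is a substring of the text
def pvHasB (g : String × List String) (tl : String) : Bool :=
  ((PySem.Set.ofList (g.1 :: g.2) : List String).any
      (fun f => PySem.Set.contains (PySem.Set.ofList (PySem.Str.split₀ tl)) f))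
  || ((PySem.Set.ofList (g.1 :: g.2) : List String).any
      (fun f => PySem.Str.isIn " " f && PySem.Str.isIn f tl))

-- every character of every word produced by str.split() is non-whitespace
theorem pv_split₀_go_nospace (s : List Char) : ∀ (cur : List Char) (acc : List (List Char)),
    (∀ c ∈ cur, PySem.Chars.isspace c = false) →
    (∀ w ∈ acc, ∀ c ∈ w, PySem.Chars.isspace c = false) →
    ∀ w ∈ PySem.Chars.split₀.go s cur acc, ∀ c ∈ w, PySem.Chars.isspace c = false := by
  induction s with
  | nil =>
    intro cur acc hc ha w hw c hcw
    simp only [PySem.Chars.split₀.go] at hw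
    by_cases hce : cur.isEmpty = true
    · rw [if_pos hce] at hw
      exact ha w (List.mem_reverse.mp hw) c hcw
    · rw [if_neg hce] at hw
      rcases List.mem_cons.mp (List.mem_reverse.mp hw) with h | h
      · subst h; exact hc c (List.mem_reverse.mp hcw)
      · exact ha w h c hcw
  | cons a s ih =>
    intro cur acc hc ha w hw c hcw
    simp only [PySem.Chars.split₀.go] at hw
    by_cases hs : PySem.Chars.isspace a = true
    · rw [if_pos hs] at hw
      by_cases hce : cur.isEmpty = true
      · rw [if_pos hce] at hw
        exact ih [] acc (by simp) ha w hw c hcw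
      · rw [if_neg hce] at hw
        refine ih [] _ (by simp) ?_ w hw c hcw
        intro w' hw' c' hc'
        rcases List.mem_cons.mp hw' with h | h
        · subst h; exact hc c' (List.mem_reverse.mp hc')
        · exact ha w' h c' hc'
    · rw [if_neg hs] at hw
      refine ih (a :: cur) acc ?_ ha w hw c hcw
      intro c' hc'
      rcases List.mem_cons.mp hc' with h | h
      · subst h; exact eq_false_of_ne_true hs
      · exact hc c' h

theorem pv_mem_split₀_no_space {tl f : String} (hf : f ∈ PySem.Str.split₀ tl) :
    PySem.Str.isIn " " f = false := by
  by_cases h : PySem.Str.isIn " " f = true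
  · exfalso
    have hinf := (PySem.Str.isIn_iff_infix " " f).mp h
    have hmem : ' ' ∈ f.toList := hinf.subset (by simp)
    have htl : f.toList ∈ PySem.Chars.split₀ tl.toList := by
      rw [← PySem.Str.split₀_map_toList]
      exact List.mem_map_of_mem hf
    have hns := pv_split₀_go_nospace tl.toList [] [] (by simp) (by simp) f.toList
      (by simpa [PySem.Chars.split₀] using htl) ' ' hmem
    exact absurd hns (by decide)
  · exact eq_false_of_ne_true h

-- the flag-repair fold, in closed form
theorem pv_fold_flags {α : Type} (c a b : α → Bool) (L : List α) : ∀ (x y : Bool),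
    L.foldl (fun p f =>
      if c f then (p.1 || a f, p.2 || b f) else p) (x, y)
    = (x || L.any (fun f => c f && a f), y || L.any (fun f => c f && b f)) := by
  induction L with
  | nil => intro x y; simp
  | cons f L ih =>
    intro x y
    cases hc : c f <;> simp [hc, ih, Bool.or_assoc]

theorem pv_inter_words (tl : String) (forms : List String) :
    (!(PySem.Set.inter (PySem.Set.ofList (PySem.Str.split₀ tl)) (PySem.Set.ofList forms)).isEmpty)
    = (PySem.Set.ofList forms : List String).any
        (fun f => PySem.Set.contains (PySem.Set.ofList (PySem.Str.split₀ tl)) f) := by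
  rw [Bool.eq_iff_iff]
  simp only [Bool.not_eq_true', List.isEmpty_eq_false_iff_exists_mem, List.any_eq_true,
    PySem.Set.mem_inter, PySem.Set.contains_iff]
  tauto

-- one step of A's loop, on abstract flags
theorem pv_step (A B mo mn r : Bool) :
    (if (if !(A && B) then (A || mo, B || mn) else (A, B)).1 &&
        (if !(A && B) then (A || mo, B || mn) else (A, B)).2 then true else r)
    = (((A || mo) && (B || mn)) || r) := by
  cases A <;> cases B <;> cases mo <;> cases mn <;> cases r <;> rfl

-- A's loop = "some group matches both sides"
theorem pv_loopA_eq_any (gs : List (String × List String)) (ol nl : String) :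
    pvLoopA gs (PySem.Set.ofList (PySem.Str.split₀ ol)) (PySem.Set.ofList (PySem.Str.split₀ nl)) ol nl
    = gs.any (fun g => pvHasB g ol && pvHasB g nl) := by
  induction gs with
  | nil => rfl
  | cons g gs ih =>
    simp only [pvLoopA, List.any_cons]
    rw [pv_fold_flags, pv_inter_words ol (g.1 :: g.2), pv_inter_words nl (g.1 :: g.2), ih, pv_step]
    rfl

theorem pv_mem_single (f : String) (i : Int) :
    (f, i) ∈ pvSingle ↔ ∃ (k : Nat) (_ : k < pvSem.length), i = (k : Int) ∧
      f ∈ (PySem.Set.ofList (pvSem[k].1 :: pvSem[k].2) : List String) ∧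
      PySem.Str.isIn " " f = false := by
  simp only [pvSingle, List.mem_flatMap, PySem.List.mem_enumerate_iff, List.mem_map,
    List.mem_filter, Bool.not_eq_true', Prod.mk.injEq, zero_add]
  constructor
  · rintro ⟨q, ⟨k, hk, rfl⟩, f', ⟨hf', hsp⟩, rfl, rfl⟩
    exact ⟨k, hk, rfl, hf', hsp⟩
  · rintro ⟨k, hk, rfl, hf, hsp⟩
    exact ⟨((k : Int), pvSem[k]), ⟨k, hk, rfl⟩, f, ⟨hf, hsp⟩, rfl, rfl⟩

theorem pv_mem_multi (f : String) (i : Int) :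
    (f, i) ∈ pvMulti ↔ ∃ (k : Nat) (_ : k < pvSem.length), i = (k : Int) ∧
      f ∈ (PySem.Set.ofList (pvSem[k].1 :: pvSem[k].2) : List String) ∧
      PySem.Str.isIn " " f = true := by
  simp only [pvMulti, List.mem_flatMap, PySem.List.mem_enumerate_iff, List.mem_map,
    List.mem_filter, Prod.mk.injEq, zero_add]
  constructor
  · rintro ⟨q, ⟨k, hk, rfl⟩, f', ⟨hf', hsp⟩, rfl, rfl⟩
    exact ⟨k, hk, rfl, hf', hsp⟩
  · rintro ⟨k, hk, rfl, hf, hsp⟩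
    exact ⟨((k : Int), pvSem[k]), ⟨k, hk, rfl⟩, f, ⟨hf, hsp⟩, rfl, rfl⟩

-- B's group-id set membership
theorem pv_mem_groupIds (tl : String) (i : Int) :
    i ∈ pvGroupIds tl ↔ ∃ (k : Nat) (h : k < pvSem.length), i = (k : Int) ∧ pvHasB pvSem[k] tl = true := by
  simp only [pvGroupIds, PySem.Set.mem_update, PySem.Set.mem_ofList, List.mem_map,
    List.mem_filter]
  constructor
  · rintro (⟨⟨fp, ip⟩, ⟨hmem, hw⟩, rfl⟩ | ⟨⟨fp, ip⟩, ⟨hmem, hin⟩, rfl⟩)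
    · obtain ⟨k, hk, rfl, hf, _⟩ := (pv_mem_single fp ip).mp hmem
      refine ⟨k, hk, rfl, ?_⟩
      simp only [pvHasB, Bool.or_eq_true, List.any_eq_true]
      exact Or.inl ⟨fp, hf, hw⟩
    · obtain ⟨k, hk, rfl, hf, hsp⟩ := (pv_mem_multi fp ip).mp hmem
      refine ⟨k, hk, rfl, ?_⟩
      simp only [pvHasB, Bool.or_eq_true, List.any_eq_true, Bool.and_eq_true]
      exact Or.inr ⟨fp, hf, hsp, hin⟩
  · rintro ⟨k, hk, rfl, hb⟩
    simp only [pvHasB, Bool.or_eq_true, List.any_eq_true, Bool.and_eq_true] at hb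
    rcases hb with ⟨f, hf, hw⟩ | ⟨f, hf, hsp, hin⟩
    · have hns : PySem.Str.isIn " " f = false :=
        pv_mem_split₀_no_space ((PySem.Set.mem_ofList _ _).mp ((PySem.Set.contains_iff _ _).mp hw))
      exact Or.inl ⟨(f, (k : Int)), ⟨(pv_mem_single f _).mpr ⟨k, hk, rfl, hf, hns⟩, hw⟩, rfl⟩
    · exact Or.inr ⟨(f, (k : Int)), ⟨(pv_mem_multi f _).mpr ⟨k, hk, rfl, hf, hsp⟩, hin⟩, rfl⟩

theorem pv_core (ol nl : String) :
    pvLoopA pvSem (PySem.Set.ofList (PySem.Str.split₀ ol)) (PySem.Set.ofList (PySem.Str.split₀ nl)) ol nl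
    = !(PySem.Set.isdisjoint (pvGroupIds ol) (pvGroupIds nl)) := by
  rw [pv_loopA_eq_any, Bool.eq_iff_iff]
  simp only [List.any_eq_true, Bool.and_eq_true, Bool.not_eq_true']
  constructor
  · rintro ⟨g, hg, h1, h2⟩
    obtain ⟨k, hk, rfl⟩ := List.mem_iff_getElem.mp hg
    cases hd : PySem.Set.isdisjoint (pvGroupIds ol) (pvGroupIds nl)
    · rfl
    · exfalso
      exact (PySem.Set.isdisjoint_iff _ _).mp hd ((k : Int))
        ((pv_mem_groupIds ol _).mpr ⟨k, hk, rfl, h1⟩)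
        ((pv_mem_groupIds nl _).mpr ⟨k, hk, rfl, h2⟩)
  · intro hd
    have hne : ¬ (∀ x ∈ pvGroupIds ol, x ∉ pvGroupIds nl) := by
      intro hall
      rw [(PySem.Set.isdisjoint_iff _ _).mpr hall] at hd
      exact Bool.true_eq_false.mp hd
    push Not at hne
    obtain ⟨i, hio, hin⟩ := hne
    obtain ⟨k, hk, hik, hbO⟩ := (pv_mem_groupIds ol i).mp hio
    obtain ⟨k', hk', hik', hbN⟩ := (pv_mem_groupIds nl i).mp hin
    obtain rfl : k = k' := Int.natCast_inj.mp (hik.symm.trans hik')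
    exact ⟨pvSem[k], List.getElem_mem hk, hbO, hbN⟩

theorem pv_tails (ol nl : String) :
    (if ol == nl then true
     else if PySem.Str.isIn ol nl && pvMeaningful ol nl then true
     else if PySem.Str.isIn nl ol && pvMeaningful nl ol then true
     else pvLoopA pvSem (PySem.Set.ofList (PySem.Str.split₀ ol)) (PySem.Set.ofList (PySem.Str.split₀ nl)) ol nl)
    = (if ol == nl then true
     else if PySem.Str.isIn ol nl && pvMeaningful ol nl then true
     else if PySem.Str.isIn nl ol && pvMeaningful nl ol then true
     else !(PySem.Set.isdisjoint (pvGroupIds ol) (pvGroupIds nl))) :=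
  if_congr Iff.rfl rfl (if_congr Iff.rfl rfl (if_congr Iff.rfl rfl (pv_core ol nl)))

-- ===== VERDICT (by name: the statement is the Claim_ definition above) =====
theorem is_semantic_equivalent_py_spec : Claim_equal_is_semantic_equivalent_py := by
  intro old_value new_value _
  exact pv_tails (PySem.Str.strip (PySem.Str.lower old_value)) (PySem.Str.strip (PySem.Str.lower new_value))
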